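-- pv_equiv track=rewrite | github.com/LouisU/practice | common/test3.py | mfunc
-- ===== SOURCE A (Python) =====
-- def mfunc(numbers, colors):
--     count = len(numbers)
--     color_to_number_dict = {}
--     number_to_color_dict = {}
--     for i in range(count):
--         if numbers[i] not in number_to_color_dict:
--             number_to_color_dict[numbers[i]] = [colors[i]]
--         else:
--             number_to_color_dict[numbers[i]].append(colors[i])
--
--         if colors[i] not in color_to_number_dict:
--             color_to_number_dict[colors[i]] = [numbers[i]]
--         else:
--             color_to_number_dict[colors[i]].append(numbers[i])
--     max_card = 0
--
--     for color, nums in color_to_number_dict.items():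
--         temp_count = 0
--         for num in nums:
--             temp_count += len(number_to_color_dict[num])
--         max_card = max(temp_count, max_card)
--
--     return max_card
-- ===== SOURCE B (Python) =====
-- def mfunc(numbers, colors):
--     number_count = {}
--     for num in numbers:
--         number_count[num] = number_count.get(num, 0) + 1
--     color_sum = {}
--     for i in range(len(numbers)):
--         color_sum[colors[i]] = color_sum.get(colors[i], 0) + number_count[numbers[i]]
--     return max(color_sum.values(), default=0)
-- ===== Notes on version B (the rewrite author's own statement) =====
-- stated objective: simpler
-- what changed: Replaced the two adjacency-list dicts and the nested color-by-number second loop with a precomputed number-frequency counter and one flat accumulation pass, finishing with max(values, default=0).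
import Mathlib
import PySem

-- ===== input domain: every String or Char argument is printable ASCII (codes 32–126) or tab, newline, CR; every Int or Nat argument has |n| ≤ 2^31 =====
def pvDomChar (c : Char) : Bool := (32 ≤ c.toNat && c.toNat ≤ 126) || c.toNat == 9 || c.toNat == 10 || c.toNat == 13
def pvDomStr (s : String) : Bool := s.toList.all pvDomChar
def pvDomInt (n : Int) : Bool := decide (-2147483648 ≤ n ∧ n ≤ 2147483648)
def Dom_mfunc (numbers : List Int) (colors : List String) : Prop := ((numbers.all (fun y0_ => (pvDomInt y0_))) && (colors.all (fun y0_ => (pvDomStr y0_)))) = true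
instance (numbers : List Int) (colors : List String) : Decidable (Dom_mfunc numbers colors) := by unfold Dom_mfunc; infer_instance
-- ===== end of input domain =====

-- B replaces A's two adjacency-list dicts and nested color×number loop by a number-frequency
-- counter plus one flat accumulation pass (objective: simpler).

-- ===== PORT A =====
def mfunc (numbers : List Int) (colors : List String) : Int :=
  let count : Int := (numbers.length : Int)
  let dicts :=
    (PySem.List.pyRange 0 count 1).foldl
      (fun (st : PySem.Dict Int (List String) × PySem.Dict String (List Int)) i =>
        -- numbers[i] / colors[i]; Pre_ keeps every index in range, so the defaults are never read
        let num := PySem.List.pyGetD numbers i 0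
        let col := PySem.List.pyGetD colors i ""
        (if st.1.contains num = false then st.1.insert num [col]
         else st.1.modify num [] (fun l => l ++ [col]),
         if st.2.contains col = false then st.2.insert col [num]
         else st.2.modify col [] (fun l => l ++ [num])))
      (PySem.Dict.empty, PySem.Dict.empty)
  dicts.2.items.foldl
    (fun max_card p =>
      -- number_to_color_dict[num]: the key is always present, so getD [] is exact
      let temp_count := p.2.foldl (fun t num => t + ((dicts.1.getD num []).length : Int)) 0
      max temp_count max_card) 0

-- ===== PORT B =====
def mfunc_alt (numbers : List Int) (colors : List String) : Int :=
  let number_count := numbers.foldl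
    (fun (d : PySem.Dict Int Int) num => d.insert num (d.getD num 0 + 1)) PySem.Dict.empty
  let color_sum := (PySem.List.pyRange 0 (numbers.length : Int) 1).foldl
    (fun (d : PySem.Dict String Int) i =>
      -- colors[i] / numbers[i]; Pre_ keeps every index in range; number_count[numbers[i]] always hits
      d.insert (PySem.List.pyGetD colors i "")
        (d.getD (PySem.List.pyGetD colors i "") 0 +
          number_count.getD (PySem.List.pyGetD numbers i 0) 0))
    PySem.Dict.empty
  PySem.List.maxD color_sum.values (fun x => x) 0

-- ===== PRECONDITION & SPEC =====
-- Pre_ excludes exactly the inputs where colors is shorter than numbers: there A (and B alike)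
-- raises IndexError on colors[i].
def Pre_mfunc (numbers : List Int) (colors : List String) : Prop :=
  numbers.length ≤ colors.length
instance (numbers : List Int) (colors : List String) : Decidable (Pre_mfunc numbers colors) := by
  unfold Pre_mfunc; infer_instance

def pvWitness_mfunc : List Int × List String := ([1, 2, 1], ["r", "g", "r"])

def Spec_mfunc (numbers : List Int) (colors : List String) (out : Int) : Prop := out = mfunc_alt numbers colors
instance (numbers : List Int) (colors : List String) (out : Int) : Decidable (Spec_mfunc numbers colors out) := by unfold Spec_mfunc; infer_instance

-- ===== CLAIM (what is proved, stated in full; the proofs are below) =====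
def Claim_equal_mfunc : Prop := ∀ (numbers : List Int) (colors : List String), Dom_mfunc numbers colors → Pre_mfunc numbers colors → Spec_mfunc numbers colors (mfunc numbers colors)

-- ===== LEMMAS AND PROOFS =====

-- an index loop over range(len(nums)) reading nums[k] and cols[k] is a fold over the zip
theorem pvFoldIdxZip {σ : Type} (g : σ → Int → String → σ) :
    ∀ (nums : List Int) (cols : List String), nums.length ≤ cols.length → ∀ (s0 : σ),
      (List.range nums.length).foldl (fun s k => g s (nums.getD k 0) (cols.getD k "")) s0
        = (nums.zip cols).foldl (fun s p => g s p.1 p.2) s0 := by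
  intro nums
  induction nums with
  | nil => intro cols _ s0; simp
  | cons x xs ih =>
    intro cols hlen s0
    cases cols with
    | nil => simp at hlen
    | cons c cs =>
      simp only [List.length_cons, List.range_succ_eq_map, List.foldl_cons, List.foldl_map,
        List.getD_cons_zero, List.getD_cons_succ, List.zip_cons_cons]
      exact ih cs (by simpa using hlen) (g s0 x c)

-- A's "if key not in d: d[k]=[v] else: d[k].append(v)" is exactly d.modify k [] (· ++ [v])
theorem pvStepModify {κ β : Type} [BEq κ] [LawfulBEq κ] (d : PySem.Dict κ (List β)) (k : κ) (v : β) :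
    (if d.contains k = false then d.insert k [v] else d.modify k [] (fun l => l ++ [v]))
      = d.modify k [] (fun l => l ++ [v]) := by
  by_cases h : d.contains k = false
  · simp [h, PySem.Dict.modify, PySem.Dict.getD_of_not_contains d ([] : List β) h]
  · simp [h]

-- accumulation loop d[key p] = d.get(key p, 0) + w p, characterised pointwise
theorem pvGetDFoldlInsertAdd {κ β : Type} [BEq κ] [LawfulBEq κ] [DecidableEq κ]
    (l : List β) (key : β → κ) (w : β → Int) :
    ∀ (d : PySem.Dict κ Int) (c : κ),
      (l.foldl (fun d p => d.insert (key p) (d.getD (key p) 0 + w p)) d).getD c 0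
        = d.getD c 0 + ((l.filter (fun p => key p == c)).map w).sum := by
  induction l with
  | nil => intro d c; simp
  | cons p t ih =>
    intro d c
    simp only [List.foldl_cons, ih, List.filter_cons]
    by_cases h : key p = c
    · simp [h]
      ring
    · simp [h, PySem.Dict.getD_insert, Ne.symm h]

-- running max against 0 of nonnegative scores = max(values, default=0)
theorem pvFoldMax (l : List String) (S : String → Int) (h : ∀ c, 0 ≤ S c) :
    l.foldl (fun m c => max (S c) m) 0 = PySem.List.maxD (l.map S) (fun x => x) 0 := by
  cases l with
  | nil => simp [PySem.List.maxD, PySem.List.max?]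
  | cons c cs =>
    simp only [List.map_cons, PySem.List.maxD, PySem.List.max?_id_cons, Option.getD_some,
      List.foldl_cons, List.foldl_map]
    rw [max_eq_left (h c)]
    refine PySem.List.foldl_congr_mem _ _ _ _ ?_
    intro acc x _
    exact max_comm _ acc

-- group size in A's number_to_color_dict is the count in numbers
theorem pvFilterFstLen (numbers : List Int) (colors : List String)
    (h : numbers.length ≤ colors.length) (m : Int) :
    ((numbers.zip colors).filter (fun p => p.1 == m)).length = numbers.count m := by
  rw [← List.countP_eq_length_filter]
  conv_rhs => rw [← List.map_fst_zip h]
  rw [List.count, List.countP_map]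
  rfl

theorem pvGetDSnd (l : List (Int × String)) (d : PySem.Dict String (List Int)) (c : String) :
    (l.foldl (fun d p => d.modify p.2 [] (fun x => x ++ [p.1])) d).getD c []
      = d.getD c [] ++ (l.filter (fun p => p.2 == c)).map (fun p => p.1) := by
  have h := PySem.Dict.getD_foldl_modify_append (l.map Prod.swap) d c
  rw [List.foldl_map, List.filter_map, List.map_map] at h
  simpa [Function.comp_def] using h

theorem pvA_eq (numbers : List Int) (colors : List String) (hpre : numbers.length ≤ colors.length) :
    mfunc numbers colors
      = (PySem.Set.ofList ((numbers.zip colors).map (fun p => p.2))).foldl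
          (fun m c => max ((((numbers.zip colors).filter (fun p => p.2 == c)).map
              (fun p => ((numbers.count p.1 : Int)))).sum) m) 0 := by
  simp only [mfunc]
  rw [PySem.List.pyRange_zero_nat, List.foldl_map]
  simp only [PySem.List.pyGetD_natCast]
  have hz := pvFoldIdxZip (fun (st : PySem.Dict Int (List String) × PySem.Dict String (List Int)) num col =>
      (if st.1.contains num = false then st.1.insert num [col]
       else st.1.modify num [] (fun l => l ++ [col]),
       if st.2.contains col = false then st.2.insert col [num]
       else st.2.modify col [] (fun l => l ++ [num])))
    numbers colors hpre (PySem.Dict.empty, PySem.Dict.empty)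
  beta_reduce at hz
  rw [hz]
  simp only [pvStepModify]
  have hp := PySem.List.foldl_prod_mk
    (fun (d : PySem.Dict Int (List String)) (p : Int × String) => d.modify p.1 [] (fun l => l ++ [p.2]))
    (fun (d : PySem.Dict String (List Int)) (p : Int × String) => d.modify p.2 [] (fun l => l ++ [p.1]))
    (numbers.zip colors) PySem.Dict.empty PySem.Dict.empty
  beta_reduce at hp
  rw [hp]
  simp only [PySem.Dict.getD_foldl_modify_append, PySem.Dict.getD_empty, List.nil_append,
    List.length_map, pvFilterFstLen numbers colors hpre, PySem.List.foldl_add, zero_add]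
  have hndB := PySem.Dict.nodup_keys_foldl_modify_key (numbers.zip colors) (fun p => p.2)
    ([] : List Int) (fun _ p l => l ++ [p.1]) PySem.Dict.empty (by simp)
  beta_reduce at hndB
  have hitB := PySem.Dict.items_eq_map_keys _ hndB ([] : List Int)
  have hkB := PySem.Dict.keys_foldl_modify_key (numbers.zip colors) (fun p => p.2)
    ([] : List Int) (fun _ p l => l ++ [p.1]) PySem.Dict.empty
  beta_reduce at hkB
  rw [PySem.Dict.keys_empty, PySem.Set.update_nil_left] at hkB
  rw [hitB, hkB, List.foldl_map]
  simp only [pvGetDSnd, PySem.Dict.getD_empty, List.nil_append, List.map_map, Function.comp_def]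

theorem pvB_eq (numbers : List Int) (colors : List String) (hpre : numbers.length ≤ colors.length) :
    mfunc_alt numbers colors
      = PySem.List.maxD
          ((PySem.Set.ofList ((numbers.zip colors).map (fun p => p.2))).map
            (fun c => (((numbers.zip colors).filter (fun p => p.2 == c)).map
              (fun p => ((numbers.count p.1 : Int)))).sum))
          (fun x => x) 0 := by
  unfold mfunc_alt
  simp only [PySem.Dict.foldl_insert_getD_add_one_eq_counter]
  rw [PySem.List.pyRange_zero_nat, List.foldl_map]
  simp only [PySem.List.pyGetD_natCast]
  have hz := pvFoldIdxZip (fun (d : PySem.Dict String Int) num col =>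
      d.insert col (d.getD col 0 + (PySem.Dict.counter numbers).getD num 0))
    numbers colors hpre PySem.Dict.empty
  beta_reduce at hz
  rw [hz]
  simp only [PySem.Dict.getD_counter]
  have hnd := PySem.Dict.nodup_keys_foldl_insert_key (numbers.zip colors) (fun p => p.2)
    (fun (d : PySem.Dict String Int) p => d.getD p.2 0 + (List.count p.1 numbers : Int))
    PySem.Dict.empty (by simp)
  beta_reduce at hnd
  have hit := PySem.Dict.items_eq_map_keys _ hnd (0 : Int)
  have hk := PySem.Dict.keys_foldl_insert_key (numbers.zip colors) (fun p => p.2)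
    (fun (d : PySem.Dict String Int) p => d.getD p.2 0 + (List.count p.1 numbers : Int))
    PySem.Dict.empty
  beta_reduce at hk
  rw [PySem.Dict.keys_empty, PySem.Set.update_nil_left] at hk
  have hgd := pvGetDFoldlInsertAdd (numbers.zip colors) (fun p => p.2)
    (fun p => (List.count p.1 numbers : Int)) PySem.Dict.empty
  beta_reduce at hgd
  simp only [PySem.Dict.values]
  rw [hit, hk]
  simp only [List.map_map, Function.comp_def, hgd, PySem.Dict.getD_empty, zero_add]

-- ===== VERDICT (by name: the statement is the Claim_ definition above) =====
theorem mfunc_spec : Claim_equal_mfunc := by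
  intro numbers colors _ hpre
  unfold Spec_mfunc
  rw [pvA_eq numbers colors hpre, pvB_eq numbers colors hpre]
  exact pvFoldMax _ _ (fun c => List.sum_nonneg (fun x hx => by
    obtain ⟨p, -, rfl⟩ := List.mem_map.mp hx
    exact Int.natCast_nonneg _))
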